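-- pv_equiv track=rewrite | github.com/mihirKachroo/COVID-Bias-Detection | NLPModel/bias.py | count_feature_freq
-- ===== SOURCE A (Python) =====
-- from builtins import range, zip, str, object
--
-- def count_feature_freq(feature_list, tokens_list, txt_lwr):
--     cnt = 0
--     # count unigrams
--     for w in tokens_list:
--         if w in feature_list:
--             cnt += 1
--         # count wildcard features
--         for feature in feature_list:
--             if str(feature).endswith('*') and str(w).startswith(feature[:-1]):
--                 cnt += 1
--     # count n_gram phrase features
--     for feature in feature_list:
--         if " " in feature and feature in txt_lwr:
--             cnt += str(txt_lwr).count(feature)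
--     return cnt
-- ===== SOURCE B (Python) =====
-- def count_feature_freq(feature_list, tokens_list, txt_lwr):
--     # index the features once: exact unigrams as a set, wildcard prefixes as a
--     # frequency table; then each token is scored by looking up its own prefixes.
--     exact = set(feature_list)
--     prefixes = [f[:-1] for f in feature_list if f.endswith('*')]
--     prefix_count = {}
--     for p in prefixes:
--         prefix_count[p] = prefix_count.get(p, 0) + 1
--     cnt = 0
--     for w in tokens_list:
--         if w in exact:
--             cnt += 1
--         for i in range(len(w) + 1):
--             cnt += prefix_count.get(w[:i], 0)
--     for f in feature_list:
--         if " " in f and f in txt_lwr: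
--             cnt += txt_lwr.count(f)
--     return cnt
-- ===== Notes on version B (the rewrite author's own statement) =====
-- stated objective: faster
-- what changed: B builds a set of exact features and a prefix-frequency dict of wildcard features once, then scores each token by looking up its own prefixes, instead of A's inner scan over the whole feature list for every token.
import Mathlib
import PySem

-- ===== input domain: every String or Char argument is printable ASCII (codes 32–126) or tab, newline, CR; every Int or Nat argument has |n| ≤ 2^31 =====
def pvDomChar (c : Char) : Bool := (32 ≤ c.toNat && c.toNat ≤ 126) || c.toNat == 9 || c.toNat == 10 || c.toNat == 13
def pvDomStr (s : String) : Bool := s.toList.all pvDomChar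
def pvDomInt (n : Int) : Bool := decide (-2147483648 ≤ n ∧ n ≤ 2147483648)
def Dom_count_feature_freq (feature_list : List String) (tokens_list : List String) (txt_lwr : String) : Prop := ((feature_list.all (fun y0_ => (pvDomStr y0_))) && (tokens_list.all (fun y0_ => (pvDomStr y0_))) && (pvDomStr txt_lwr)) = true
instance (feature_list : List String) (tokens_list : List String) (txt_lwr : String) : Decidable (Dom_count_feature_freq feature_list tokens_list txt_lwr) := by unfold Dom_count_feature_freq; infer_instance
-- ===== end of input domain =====

-- B indexes the features once (a set for exact unigrams, a prefix-frequency dict for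
-- wildcards) and scores each token by its own prefixes — O((T+F)·L) instead of A's O(T·F·L).

-- ===== PORT A =====
def count_feature_freq (feature_list : List String) (tokens_list : List String) (txt_lwr : String) : Int :=
  let cnt : Int := tokens_list.foldl (fun cnt w =>
    let cnt := if feature_list.contains w then cnt + 1 else cnt
    feature_list.foldl (fun cnt feature =>
      if PySem.Str.endswith feature "*" && PySem.Str.startswith w (PySem.Str.slice feature none (some (-1)))
      then cnt + 1 else cnt) cnt) 0
  feature_list.foldl (fun cnt feature =>
    if PySem.Str.isIn " " feature && PySem.Str.isIn feature txt_lwr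
    then cnt + (PySem.Str.count txt_lwr feature : Int) else cnt) cnt

-- ===== PORT B =====
def count_feature_freq_alt (feature_list : List String) (tokens_list : List String) (txt_lwr : String) : Int :=
  let exact := PySem.Set.ofList feature_list
  let prefixes := (feature_list.filter (fun f => PySem.Str.endswith f "*")).map
    (fun f => PySem.Str.slice f none (some (-1)))
  let prefix_count := prefixes.foldl (fun d p => d.insert p (d.getD p 0 + 1)) PySem.Dict.empty
  let cnt : Int := tokens_list.foldl (fun cnt w =>
    let cnt := if PySem.Set.contains exact w then cnt + 1 else cnt
    (PySem.List.pyRange 0 (PySem.Str.len w + 1) 1).foldl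
      (fun cnt i => cnt + prefix_count.getD (PySem.Str.slice w none (some i)) 0) cnt) 0
  feature_list.foldl (fun cnt feature =>
    if PySem.Str.isIn " " feature && PySem.Str.isIn feature txt_lwr
    then cnt + (PySem.Str.count txt_lwr feature : Int) else cnt) cnt

-- ===== PRECONDITION & SPEC =====
def Spec_count_feature_freq (feature_list : List String) (tokens_list : List String) (txt_lwr : String) (out : Int) : Prop := out = count_feature_freq_alt feature_list tokens_list txt_lwr
instance (feature_list : List String) (tokens_list : List String) (txt_lwr : String) (out : Int) : Decidable (Spec_count_feature_freq feature_list tokens_list txt_lwr out) := by unfold Spec_count_feature_freq; infer_instance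

-- ===== CLAIM (what is proved, stated in full; the proofs are below) =====
def Claim_equal_count_feature_freq : Prop := ∀ (feature_list : List String) (tokens_list : List String) (txt_lwr : String), Dom_count_feature_freq feature_list tokens_list txt_lwr → Spec_count_feature_freq feature_list tokens_list txt_lwr (count_feature_freq feature_list tokens_list txt_lwr)

-- ===== LEMMAS AND PROOFS =====

-- among k = 0 … |cs|, exactly one k has w.toList.take k = p when p is a prefix of cs, none otherwise
lemma take_indicator (cs p : List Char) :
    ((List.range (cs.length + 1)).map (fun k => if p == cs.take k then (1 : Int) else 0)).sum
      = if p <+: cs then 1 else 0 := by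
  rw [PySem.List.sum_map_ite_one_zero]
  by_cases h : p <+: cs
  · rw [if_pos h]
    have hc : List.countP (fun k => p == cs.take k) (List.range (cs.length + 1))
        = List.countP (fun k => k == p.length) (List.range (cs.length + 1)) := by
      apply List.countP_congr
      intro k hk
      simp only [List.mem_range] at hk
      simp only [beq_iff_eq]
      constructor
      · intro ht
        have h1 : (cs.take k).length = p.length := by rw [← ht]
        rw [List.length_take] at h1
        omega
      · intro hk'
        subst hk'
        exact List.prefix_iff_eq_take.mp h
    rw [hc, ← List.count_eq_countP,
      List.count_eq_one_of_mem List.nodup_range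
        (by simp only [List.mem_range]; exact Nat.lt_succ_of_le h.length_le)]
    rfl
  · rw [if_neg h]
    have hc : List.countP (fun k => p == cs.take k) (List.range (cs.length + 1)) = 0 := by
      rw [List.countP_eq_zero]
      intro k _
      simp only [beq_iff_eq]
      intro ht
      exact h (ht ▸ List.take_prefix k cs)
    rw [hc]
    rfl

-- summing the multiplicity of each prefix of cs in ps counts the elements of ps that prefix cs
lemma sum_count_take (ps : List (List Char)) (cs : List Char) :
    ((List.range (cs.length + 1)).map (fun k => (List.count (cs.take k) ps : Int))).sum
      = (List.countP (fun p => PySem.Chars.startswith cs p) ps : Int) := by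
  induction ps with
  | nil => simp
  | cons p ps ih =>
    have hmap : (List.range (cs.length + 1)).map (fun k => (List.count (cs.take k) (p :: ps) : Int))
        = (List.range (cs.length + 1)).map
            (fun k => (List.count (cs.take k) ps : Int) + (if p == cs.take k then (1 : Int) else 0)) := by
      apply List.map_congr_left
      intro k _
      rw [List.count_cons]
      split_ifs <;> push_cast <;> ring
    rw [hmap, PySem.List.sum_map_add_int, ih, take_indicator, List.countP_cons]
    by_cases h : p <+: cs <;>
      simp [h, PySem.Chars.startswith_iff]

lemma contains_ofList (xs : List String) (w : String) :
    PySem.Set.contains (PySem.Set.ofList xs) w = xs.contains w := by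
  have h := PySem.Set.mem_ofList xs w
  simp [PySem.Set.contains] at *

lemma token_eq (fs : List String) (w : String) (cnt : Int) :
    (PySem.List.pyRange 0 (PySem.Str.len w + 1) 1).foldl
      (fun c i => c +
        (((fs.filter (fun f => PySem.Str.endswith f "*")).map
            (fun f => PySem.Str.slice f none (some (-1)))).foldl
          (fun d p => d.insert p (d.getD p 0 + 1)) PySem.Dict.empty).getD
          (PySem.Str.slice w none (some i)) 0)
      (if PySem.Set.contains (PySem.Set.ofList fs) w then cnt + 1 else cnt)
    = fs.foldl
        (fun c f =>
          if PySem.Str.endswith f "*" && PySem.Str.startswith w (PySem.Str.slice f none (some (-1)))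
          then c + 1 else c)
        (if fs.contains w then cnt + 1 else cnt) := by
  set prefixes := (fs.filter (fun f => PySem.Str.endswith f "*")).map
    (fun f => PySem.Str.slice f none (some (-1))) with hpre
  rw [PySem.List.foldl_add, PySem.List.foldl_if_add_one, contains_ofList]
  congr 1
  have hgetD : ∀ s : String,
      (prefixes.foldl (fun d p => d.insert p (d.getD p 0 + 1)) PySem.Dict.empty).getD s 0
        = (List.count s.toList (prefixes.map String.toList) : Int) := by
    intro s
    rw [PySem.Dict.getD_foldl_insert_add_one,
      List.count_map_of_injective prefixes String.toList (fun _ _ h => String.toList_injective h) s]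
    simp
  have hps : prefixes.map String.toList
      = (fs.filter (fun f => PySem.Str.endswith f "*")).map (fun f => f.toList.dropLast) := by
    rw [hpre, List.map_map]
    apply List.map_congr_left
    intro f _
    exact PySem.Str.slice_to_neg_one f
  have hlen : (PySem.Str.len w + 1 - 0).toNat = w.toList.length + 1 := by
    rw [PySem.Str.len_eq]
    omega
  rw [PySem.List.pyRange_one, List.map_map, hlen]
  have hmap : (List.range (w.toList.length + 1)).map
      ((fun i => (prefixes.foldl (fun d p => d.insert p (d.getD p 0 + 1)) PySem.Dict.empty).getD
          (PySem.Str.slice w none (some i)) 0) ∘ (fun k : Nat => (0 : Int) + k))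
      = (List.range (w.toList.length + 1)).map
          (fun k => (List.count (w.toList.take k) (prefixes.map String.toList) : Int)) := by
    apply List.map_congr_left
    intro k _
    simp only [Function.comp]
    rw [hgetD]
    congr 2
    rw [PySem.Str.toList_slice, PySem.Chars.slice_eq_listSlice,
      PySem.List.slice_to w.toList (show (0 : Int) ≤ 0 + (k : Int) by omega)]
    congr 1
    omega
  rw [hmap, hps, sum_count_take]
  congr 1
  rw [List.countP_map, List.countP_filter]
  apply List.countP_congr
  intro f _
  simp only [Function.comp]
  rw [Bool.and_eq_true, Bool.and_eq_true]
  constructor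
  · rintro ⟨hsw, hwc⟩
    refine ⟨hwc, ?_⟩
    rw [PySem.Str.startswith_eq, PySem.Str.slice_to_neg_one]
    exact hsw
  · rintro ⟨hwc, hsw⟩
    refine ⟨?_, hwc⟩
    rw [PySem.Str.startswith_eq, PySem.Str.slice_to_neg_one] at hsw
    exact hsw

lemma fold_tokens (fs ts : List String) (cnt : Int) :
    List.foldl (fun c w =>
        fs.foldl (fun c2 f =>
            if PySem.Str.endswith f "*" && PySem.Str.startswith w (PySem.Str.slice f none (some (-1)))
            then c2 + 1 else c2)
          (if fs.contains w then c + 1 else c)) cnt ts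
      = List.foldl (fun c w =>
          (PySem.List.pyRange 0 (PySem.Str.len w + 1) 1).foldl
            (fun c2 i => c2 +
              (((fs.filter (fun f => PySem.Str.endswith f "*")).map
                  (fun f => PySem.Str.slice f none (some (-1)))).foldl
                (fun d p => d.insert p (d.getD p 0 + 1)) PySem.Dict.empty).getD
                (PySem.Str.slice w none (some i)) 0)
            (if PySem.Set.contains (PySem.Set.ofList fs) w then c + 1 else c)) cnt ts := by
  induction ts generalizing cnt with
  | nil => rfl
  | cons w ts ih =>
    simp only [List.foldl_cons]
    rw [← token_eq fs w cnt, ih]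

-- ===== VERDICT (by name: the statement is the Claim_ definition above) =====
theorem count_feature_freq_spec : Claim_equal_count_feature_freq := by
  intro feature_list tokens_list txt_lwr _
  unfold Spec_count_feature_freq
  simp only [count_feature_freq, count_feature_freq_alt]
  congr 1
  exact fold_tokens feature_list tokens_list 0
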